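-- pv_equiv track=rewrite | github.com/nicloh-afk/tcx1002 | intropgm_tut2.py | rank_medals
-- ===== SOURCE A (Python) =====
-- def rank_medals(rows):
--   sorted_rows = sorted(rows, key=lambda row: (-row[1], -row[2],-row[3], row[0]))
--
--   rank = 0
--   prev_medals = None
--
--   ranked_res = []
--
--   for country,g,s,b in sorted_rows:
--     medals = (g,s,b)
--
--     if medals!=prev_medals:
--       rank+=1
--       prev_medals = medals
--     ranked_res.append((rank,country,g,s,b))
--
--   return ranked_res
-- ===== SOURCE B (Python) =====
-- def rank_medals(rows):
--     srt = sorted(rows, key=lambda r: (-r[1], -r[2], -r[3], r[0]))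
--     distinct = {(g, s, b) for _, g, s, b in rows}
--     return [(1 + sum(1 for t in distinct if t > (g, s, b)), c, g, s, b)
--             for c, g, s, b in srt]
-- ===== Notes on version B (the rewrite author's own statement) =====
-- stated objective: alternative
-- what changed: A computes dense ranks with a running (rank, prev_medals) accumulator over the sorted rows; B has no sequential rank state at all: it builds the set of distinct medal tuples from the raw rows and computes each row's rank as the closed form 1 + count of distinct tuples strictly greater.
import Mathlib
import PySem

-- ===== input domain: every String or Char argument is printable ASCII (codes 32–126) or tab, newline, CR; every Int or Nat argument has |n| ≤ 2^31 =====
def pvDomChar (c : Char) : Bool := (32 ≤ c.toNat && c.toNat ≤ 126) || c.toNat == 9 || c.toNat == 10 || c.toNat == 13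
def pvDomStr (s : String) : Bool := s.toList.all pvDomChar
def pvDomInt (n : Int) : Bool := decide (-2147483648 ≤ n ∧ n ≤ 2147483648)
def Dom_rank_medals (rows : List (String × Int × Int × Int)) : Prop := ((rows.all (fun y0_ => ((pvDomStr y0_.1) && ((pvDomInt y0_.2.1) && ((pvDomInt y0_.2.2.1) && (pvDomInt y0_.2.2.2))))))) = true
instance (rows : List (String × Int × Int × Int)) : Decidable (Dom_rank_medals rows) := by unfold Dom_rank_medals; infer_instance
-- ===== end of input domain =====

-- B drops A's running (rank, prev_medals) accumulator entirely: each row's dense rank is the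
-- closed-form count 1 + #{distinct medal tuples strictly greater}, computed against a set of
-- all medal tuples (objective: alternative algorithm, no sequential rank state).

-- shared sort key: Python's (-g, -s, -b, country), lexicographic (Lex nests match tuple comparison)
def pvKey (row : String × Int × Int × Int) : Lex (Int × Lex (Int × Lex (Int × String))) :=
  toLex (-row.2.1, toLex (-row.2.2.1, toLex (-row.2.2.2, row.1)))

-- medals = (g, s, b)
def pvMedals (row : String × Int × Int × Int) : Int × Int × Int :=
  (row.2.1, row.2.2.1, row.2.2.2)

-- ===== PORT A =====
-- loop body of A: if medals != prev_medals: rank += 1; prev_medals = medals; append (rank, country, g, s, b)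
def pvStepA (st : Int × Option (Int × Int × Int) × List (Int × String × Int × Int × Int))
    (row : String × Int × Int × Int) :
    Int × Option (Int × Int × Int) × List (Int × String × Int × Int × Int) :=
  let medals := pvMedals row
  if some medals ≠ st.2.1 then
    (st.1 + 1, some medals, st.2.2 ++ [(st.1 + 1, row.1, row.2.1, row.2.2.1, row.2.2.2)])
  else
    (st.1, st.2.1, st.2.2 ++ [(st.1, row.1, row.2.1, row.2.2.1, row.2.2.2)])

def rank_medals (rows : List (String × Int × Int × Int)) : List (Int × String × Int × Int × Int) :=
  ((PySem.List.sorted rows pvKey false).foldl pvStepA (0, none, [])).2.2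

-- ===== PORT B =====
-- Python's tuple comparison t > m on (g, s, b) triples
def pvMedGT (a b : Int × Int × Int) : Bool :=
  a.1 > b.1 || (a.1 == b.1 && (a.2.1 > b.2.1 || (a.2.1 == b.2.1 && a.2.2 > b.2.2)))

def rank_medals_alt (rows : List (String × Int × Int × Int)) : List (Int × String × Int × Int × Int) :=
  let srt := PySem.List.sorted rows pvKey false
  -- distinct = {(g, s, b) for _, g, s, b in rows}
  let distinct : PySem.Set (Int × Int × Int) := PySem.Set.ofList (rows.map pvMedals)
  -- 1 + sum(1 for t in distinct if t > (g, s, b)) — a count over the set, order-independent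
  srt.map (fun row =>
    ((1 : Int) + ((distinct.filter (fun t => pvMedGT t (pvMedals row))).length : Int),
     row.1, row.2.1, row.2.2.1, row.2.2.2))

-- ===== PRECONDITION & SPEC =====
def Spec_rank_medals (rows : List (String × Int × Int × Int)) (out : List (Int × String × Int × Int × Int)) : Prop := out = rank_medals_alt rows
instance (rows : List (String × Int × Int × Int)) (out : List (Int × String × Int × Int × Int)) : Decidable (Spec_rank_medals rows out) := by unfold Spec_rank_medals; infer_instance

-- ===== CLAIM =====
def Claim_equal_rank_medals : Prop := ∀ (rows : List (String × Int × Int × Int)), Dom_rank_medals rows → Spec_rank_medals rows (rank_medals rows)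

-- ===== LEMMAS AND PROOFS =====

-- "greater or equal" on medal tuples, as a Prop
def pvMedGE (a b : Int × Int × Int) : Prop := pvMedGT a b = true ∨ a = b

lemma pvMedGT_arith {a b : Int × Int × Int} :
    pvMedGT a b = true ↔ (b.1 < a.1 ∨ (a.1 = b.1 ∧ (b.2.1 < a.2.1 ∨ (a.2.1 = b.2.1 ∧ b.2.2 < a.2.2)))) := by
  simp [pvMedGT, Bool.or_eq_true, Bool.and_eq_true]

lemma pvMedGT_irrefl (a : Int × Int × Int) : pvMedGT a a = false := by
  simp [pvMedGT]

lemma pvMedGT_trans {a b c : Int × Int × Int}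
    (h1 : pvMedGT a b = true) (h2 : pvMedGT b c = true) : pvMedGT a c = true := by
  rw [pvMedGT_arith] at *
  omega

lemma pvMedGT_asymm {a b : Int × Int × Int}
    (h1 : pvMedGT a b = true) (h2 : pvMedGT b a = true) : False := by
  rw [pvMedGT_arith] at *
  omega

lemma pvMedGE_trans {a b c : Int × Int × Int} (h1 : pvMedGE a b) (h2 : pvMedGE b c) : pvMedGE a c := by
  rcases h1 with h1 | rfl
  · rcases h2 with h2 | rfl
    · exact Or.inl (pvMedGT_trans h1 h2)
    · exact Or.inl h1
  · exact h2

-- pvKey order refines the medal order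
lemma pvKey_mono {a b : String × Int × Int × Int} (h : pvKey a ≤ pvKey b) :
    pvMedGE (pvMedals a) (pvMedals b) := by
  simp only [pvKey, Prod.Lex.le_iff, ofLex_toLex] at h
  unfold pvMedGE pvMedals
  rw [pvMedGT_arith]
  rcases h with h1 | ⟨h1, h2 | ⟨h2, h3 | ⟨h3, _⟩⟩⟩
  · exact Or.inl (by simp; omega)
  · exact Or.inl (by simp; omega)
  · exact Or.inl (by simp; omega)
  · right; simp only [Prod.mk.injEq]; omega

-- counting helper: adding one present, non-matching element to the predicate bumps the count by 1
lemma pvFilter_or_len {α : Type} [DecidableEq α] (S : List α) (p : α → Bool) (a : α)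
    (hnd : S.Nodup) (ha : a ∈ S) (hpa : p a = false) :
    (S.filter (fun t => p t || decide (t = a))).length = (S.filter p).length + 1 := by
  induction S with
  | nil => cases ha
  | cons x t ih =>
    rcases List.nodup_cons.mp hnd with ⟨hxt, hndt⟩
    rcases List.mem_cons.mp ha with rfl | hat
    · have hrest : t.filter (fun y => p y || decide (y = a)) = t.filter p := by
        apply List.filter_congr
        intro y hy
        have : y ≠ a := fun h => hxt (h ▸ hy)
        simp [this]
      simp [hpa, hrest]
    · have hxa : x ≠ a := fun h => hxt (h ▸ hat)
      have := ih hndt hat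
      by_cases hpx : p x = true
      · simp [hpx, hxa, this]
      · simp only [Bool.not_eq_true] at hpx
        simp [hpx, hxa, this]

-- main loop invariant: on a medal-nonincreasing suffix l with previous medal pm, A's running rank
-- reproduces B's closed-form count over the distinct-medal list S
lemma pvLoop_eq (S : List (Int × Int × Int)) (hnd : S.Nodup) :
    ∀ (l : List (String × Int × Int × Int)) (r : Int) (pm : Int × Int × Int)
      (acc : List (Int × String × Int × Int × Int)),
      l.Pairwise (fun a b => pvMedGE (pvMedals a) (pvMedals b)) →
      (∀ x ∈ l, pvMedGE pm (pvMedals x)) →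
      (∀ x ∈ l, pvMedals x ∈ S) →
      pm ∈ S →
      r = 1 + ((S.filter (fun t => pvMedGT t pm)).length : Int) →
      (∀ t ∈ S, pvMedGE t pm ∨ ∃ x ∈ l, t = pvMedals x) →
      (l.foldl pvStepA (r, some pm, acc)).2.2
        = acc ++ l.map (fun row =>
            ((1 : Int) + ((S.filter (fun t => pvMedGT t (pvMedals row))).length : Int),
             row.1, row.2.1, row.2.2.1, row.2.2.2)) := by
  intro l
  induction l with
  | nil => intro r pm acc _ _ _ _ _ _; simp
  | cons x t ih =>
    intro r pm acc hpw hge hmemS hpmS hr hcov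
    have hpwt := (List.pairwise_cons.mp hpw).2
    have hhead : ∀ y ∈ t, pvMedGE (pvMedals x) (pvMedals y) := (List.pairwise_cons.mp hpw).1
    by_cases hsame : pvMedals x = pm
    · -- repeated tuple: A keeps rank r = 1 + count pm = 1 + count (medals x)
      have hstepA : pvStepA (r, some pm, acc) x
          = (r, some pm, acc ++ [(r, x.1, x.2.1, x.2.2.1, x.2.2.2)]) := by
        unfold pvStepA
        simp [hsame]
      have hrec := ih r pm (acc ++ [(r, x.1, x.2.1, x.2.2.1, x.2.2.2)]) hpwt
        (fun y hy => hge y (List.mem_cons_of_mem _ hy))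
        (fun y hy => hmemS y (List.mem_cons_of_mem _ hy)) hpmS hr
        (by intro u hu
            rcases hcov u hu with h | ⟨y, hy, rfl⟩
            · exact Or.inl h
            · rcases List.mem_cons.mp hy with rfl | hyt
              · exact Or.inl (Or.inr hsame)
              · exact Or.inr ⟨y, hyt, rfl⟩)
      simp only [List.foldl_cons, hstepA, hrec, List.map_cons, hsame]
      simp [hr]
    · -- new tuple mx: rank bumps, and count mx = count pm + 1
      have hgt : pvMedGT pm (pvMedals x) = true := by
        rcases hge x (List.mem_cons_self ..) with h | h
        · exact h
        · exact absurd h.symm hsame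
      have hstepA : pvStepA (r, some pm, acc) x
          = (r + 1, some (pvMedals x), acc ++ [(r + 1, x.1, x.2.1, x.2.2.1, x.2.2.2)]) := by
        unfold pvStepA
        simp only [ne_eq]
        rw [if_pos (by intro h; exact hsame (Option.some_inj.mp h))]
      -- the strictly-greater sets: {t : t > mx} = {t : t > pm} ∪ {pm}
      have hiff : ∀ u ∈ S, pvMedGT u (pvMedals x) = (pvMedGT u pm || decide (u = pm)) := by
        intro u hu
        by_cases hupm : u = pm
        · subst hupm
          simp [pvMedGT_irrefl, hgt]
        · by_cases hup : pvMedGT u pm = true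
          · simp [hup, pvMedGT_trans hup hgt]
          · simp only [Bool.not_eq_true] at hup
            have hne : pvMedGT u (pvMedals x) = false := by
              by_contra hc
              simp only [Bool.not_eq_false] at hc
              rcases hcov u hu with h | ⟨y, hy, rfl⟩
              · rcases h with h | rfl
                · rw [h] at hup; cases hup
                · exact hupm rfl
              · rcases List.mem_cons.mp hy with rfl | hyt
                · rw [pvMedGT_irrefl] at hc; cases hc
                · rcases hhead y hyt with h | h
                  · exact pvMedGT_asymm hc h
                  · rw [← h, pvMedGT_irrefl] at hc; cases hc
            simp [hne, hup, hupm]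
      have hcount : (S.filter (fun u => pvMedGT u (pvMedals x))).length
          = (S.filter (fun u => pvMedGT u pm)).length + 1 := by
        rw [List.filter_congr hiff]
        exact pvFilter_or_len S (fun u => pvMedGT u pm) pm hnd hpmS (pvMedGT_irrefl pm)
      have hr' : r + 1 = 1 + ((S.filter (fun u => pvMedGT u (pvMedals x))).length : Int) := by
        rw [hcount, hr]; push_cast; ring
      have hrec := ih (r + 1) (pvMedals x) (acc ++ [(r + 1, x.1, x.2.1, x.2.2.1, x.2.2.2)]) hpwt
        hhead (fun y hy => hmemS y (List.mem_cons_of_mem _ hy))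
        (hmemS x (List.mem_cons_self ..)) hr'
        (by intro u hu
            rcases hcov u hu with h | ⟨y, hy, rfl⟩
            · exact Or.inl (pvMedGE_trans h (Or.inl hgt))
            · rcases List.mem_cons.mp hy with rfl | hyt
              · exact Or.inl (Or.inr rfl)
              · exact Or.inr ⟨y, hyt, rfl⟩)
      simp only [List.foldl_cons, hstepA, hrec, List.map_cons]
      simp [hr']

-- ===== VERDICT =====
theorem rank_medals_spec : Claim_equal_rank_medals := by
  intro rows _
  unfold Spec_rank_medals rank_medals rank_medals_alt
  have hpw : (PySem.List.sorted rows pvKey false).Pairwise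
      (fun a b => pvMedGE (pvMedals a) (pvMedals b)) :=
    (PySem.List.sorted_pairwise rows pvKey).imp pvKey_mono
  have hndS : (PySem.Set.ofList (rows.map pvMedals)).Nodup := PySem.Set.nodup_ofList _
  have hmemS : ∀ u, u ∈ PySem.Set.ofList (rows.map pvMedals) ↔ ∃ y ∈ rows, u = pvMedals y := by
    intro u
    rw [PySem.Set.mem_ofList, List.mem_map]
    constructor
    · rintro ⟨y, hy, rfl⟩; exact ⟨y, hy, rfl⟩
    · rintro ⟨y, hy, rfl⟩; exact ⟨y, hy, rfl⟩
  have hmemrows : ∀ y, y ∈ PySem.List.sorted rows pvKey false ↔ y ∈ rows :=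
    fun y => (PySem.List.sorted_perm rows pvKey false).mem_iff
  cases hsrt : PySem.List.sorted rows pvKey false with
  | nil => simp
  | cons x t =>
    have hxrows : x ∈ rows := (hmemrows x).mp (hsrt ▸ List.mem_cons_self ..)
    have hpw' : (x :: t).Pairwise (fun a b => pvMedGE (pvMedals a) (pvMedals b)) := hsrt ▸ hpw
    have hhead := (List.pairwise_cons.mp hpw').1
    -- first iteration: prev_medals is None, rank becomes 1; and count (medals x) = 0
    have hcount0 : (PySem.Set.ofList (rows.map pvMedals)).filter
        (fun u => pvMedGT u (pvMedals x)) = [] := by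
      rw [List.filter_eq_nil_iff]
      intro u hu
      rcases (hmemS u).mp hu with ⟨y, hy, rfl⟩
      have hy' : y ∈ x :: t := hsrt ▸ (hmemrows y).mpr hy
      simp only [Bool.not_eq_true]
      rcases List.mem_cons.mp hy' with rfl | hyt
      · exact pvMedGT_irrefl _
      · rcases hhead y hyt with h | h
        · by_contra hc
          simp only [Bool.not_eq_false] at hc
          exact pvMedGT_asymm h hc
        · rw [← h]; exact pvMedGT_irrefl _
    have hstep0 : pvStepA (0, none, []) x
        = (1, some (pvMedals x), [(1, x.1, x.2.1, x.2.2.1, x.2.2.2)]) := by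
      unfold pvStepA
      simp
    have hinv := pvLoop_eq (PySem.Set.ofList (rows.map pvMedals)) hndS t 1 (pvMedals x)
      [(1, x.1, x.2.1, x.2.2.1, x.2.2.2)] (List.pairwise_cons.mp hpw').2 hhead
      (by intro y hy
          exact (hmemS _).mpr ⟨y, (hmemrows y).mp (hsrt ▸ List.mem_cons_of_mem _ hy), rfl⟩)
      ((hmemS _).mpr ⟨x, hxrows, rfl⟩)
      (by rw [hcount0]; simp)
      (by intro u hu
          rcases (hmemS u).mp hu with ⟨y, hy, rfl⟩
          have hy' : y ∈ x :: t := hsrt ▸ (hmemrows y).mpr hy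
          rcases List.mem_cons.mp hy' with rfl | hyt
          · exact Or.inl (Or.inr rfl)
          · exact Or.inr ⟨y, hyt, rfl⟩)
    simp only [List.foldl_cons, hstep0, hinv, List.map_cons, hcount0]
    simp
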